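-- pv_equiv track=rewrite | github.com/Jonathan-Lukwichi/pizza-operation-delivery-analysis-intelligence | reports/pdf_builder.py | wrap_long_words
-- ===== SOURCE A (Python) =====
-- def wrap_long_words(text: str, max_length: int = 50) -> str:
--     """
--     Breaks excessively long words in a string by inserting hyphens.
--     Useful for preventing fpdf2 from failing on long, unbroken strings (like URLs)
--     that exceed the cell width.
--     """
--     words = []
--     for word in text.split(' '):
--         if len(word) > max_length and not ' ' in word: # Check if it's genuinely a long word without spaces
--             # Insert hyphens
--             wrapped_word = '-'.join([word[i:i+max_length] for i in range(0, len(word), max_length)])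
--             words.append(wrapped_word)
--         else:
--             words.append(word)
--     return ' '.join(words)
-- ===== SOURCE B (Python) =====
-- import re
--
--
-- def wrap_long_words(text: str, max_length: int = 50) -> str:
--     """Same task as A, written as a single in-place regex substitution:
--     every maximal run of non-space characters is rewritten by the callback,
--     spaces (leading, trailing, repeated) are untouched."""
--     def repl(m):
--         word = m.group(0)
--         if len(word) > max_length:
--             return '-'.join(word[i:i + max_length] for i in range(0, len(word), max_length))
--         return word
--     return re.sub(r'[^ ]+', repl, text)
-- ===== Notes on version B (the rewrite author's own statement) =====
-- stated objective: idiomatic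
-- what changed: Instead of splitting on spaces, looping over the word list and rejoining, B performs one in-place regex substitution re.sub(r'[^ ]+', repl, text) whose callback hyphen-chunks each over-long token, never building or rejoining a word list (A's vacuous "' ' in word" check disappears).
-- outside the precondition, e.g. on wrap_long_words('', 0): A returns '', B returns ''
import Mathlib
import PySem

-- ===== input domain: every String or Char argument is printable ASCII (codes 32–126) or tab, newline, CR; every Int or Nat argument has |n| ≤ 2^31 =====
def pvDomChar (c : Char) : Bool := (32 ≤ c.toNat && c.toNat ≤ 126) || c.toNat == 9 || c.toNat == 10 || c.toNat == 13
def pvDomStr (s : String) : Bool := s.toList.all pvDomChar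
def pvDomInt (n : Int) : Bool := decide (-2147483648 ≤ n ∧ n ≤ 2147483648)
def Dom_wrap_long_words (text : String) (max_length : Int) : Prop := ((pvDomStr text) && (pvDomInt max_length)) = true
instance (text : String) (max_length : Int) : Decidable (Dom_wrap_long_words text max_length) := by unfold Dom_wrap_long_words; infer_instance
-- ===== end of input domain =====

-- B replaces A's split-on-space / loop over the word list / rejoin with a single in-place regex
-- substitution over the maximal non-space runs of the text (objective: idiomatic, not faster).

-- ===== PORT A =====
-- '-'.join([word[i:i+max_length] for i in range(0, len(word), max_length)])
def pvHyphenA (max_length : Int) (word : List Char) : List Char :=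
  PySem.Chars.join ['-']
    ((PySem.List.pyRange 0 (word.length : Int) max_length).map
      (fun i => PySem.List.slice word (some i) (some (i + max_length))))

def wrap_long_words (text : String) (max_length : Int) : String :=
  -- words = []; for word in text.split(' '): … append …; return ' '.join(words)
  let words : List (List Char) :=
    (PySem.Chars.splitOn text.toList [' ']).foldl
      (fun acc word =>
        if ((word.length : Int) > max_length ∧ ¬ (' ' ∈ word)) then
          acc ++ [pvHyphenA max_length word]
        else
          acc ++ [word]) []
  String.ofList (PySem.Chars.join [' '] words)

-- ===== PORT B =====
-- the callback repl: hyphen-chunk a matched token if it is over-long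
def pvReplB (max_length : Int) (word : List Char) : List Char :=
  if (word.length : Int) > max_length then
    PySem.Chars.join ['-']
      ((PySem.List.pyRange 0 (word.length : Int) max_length).map
        (fun i => PySem.List.slice word (some i) (some (i + max_length))))
  else word

-- re.sub(r'[^ ]+', repl, text): scan the text, rewrite each maximal non-space run, keep spaces
def pvSubB (max_length : Int) : List Char → List Char
  | [] => []
  | c :: rest =>
      if c = ' ' then ' ' :: pvSubB max_length rest
      else
        pvReplB max_length (c :: rest.takeWhile (· ≠ ' ')) ++
          pvSubB max_length (rest.dropWhile (· ≠ ' '))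
termination_by cs => cs.length
decreasing_by
  · simp
  · have := List.length_dropWhile_le (fun x => !decide (x = ' ')) rest
    simp; omega

def wrap_long_words_alt (text : String) (max_length : Int) : String :=
  String.ofList (pvSubB max_length text.toList)

-- ===== PRECONDITION & SPEC =====
-- Pre_ excludes max_length = 0, on which A raises ValueError from range(0, len(word), 0) for
-- every text containing a nonempty word; on the degenerate all-space texts A still returns
-- (the text unchanged) and B returns the same value there.
def Pre_wrap_long_words (text : String) (max_length : Int) : Prop := max_length ≠ 0
instance (text : String) (max_length : Int) : Decidable (Pre_wrap_long_words text max_length) := by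
  unfold Pre_wrap_long_words; infer_instance

def pvWitness_wrap_long_words : String × Int := ("hello world", 3)

def Spec_wrap_long_words (text : String) (max_length : Int) (out : String) : Prop := out = wrap_long_words_alt text max_length
instance (text : String) (max_length : Int) (out : String) : Decidable (Spec_wrap_long_words text max_length out) := by unfold Spec_wrap_long_words; infer_instance

-- ===== CLAIM (what is proved, stated in full; the proofs are below) =====
def Claim_equal_wrap_long_words : Prop := ∀ (text : String) (max_length : Int), Dom_wrap_long_words text max_length → Pre_wrap_long_words text max_length → Spec_wrap_long_words text max_length (wrap_long_words text max_length)

-- ===== LEMMAS AND PROOFS =====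

-- A's per-word rewrite, as a function
def pvWordA (max_length : Int) (word : List Char) : List Char :=
  if ((word.length : Int) > max_length ∧ ¬ (' ' ∈ word)) then pvHyphenA max_length word else word

-- pure form of PySem.Chars.splitOn on the one-character separator ' '
def pvS : List Char → List Char → List (List Char)
  | cur, [] => [cur.reverse]
  | cur, c :: rest => if c = ' ' then cur.reverse :: pvS [] rest else pvS (c :: cur) rest

lemma pvS_ne_nil (cur l : List Char) : pvS cur l ≠ [] := by
  induction l generalizing cur with
  | nil => simp [pvS]
  | cons c rest ih =>
      simp only [pvS]
      split_ifs
      · simp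
      · exact ih _

lemma pvSubB_nil (max_length : Int) : pvSubB max_length [] = [] := by
  rw [pvSubB.eq_def]

lemma pvSubB_space (max_length : Int) (rest : List Char) :
    pvSubB max_length (' ' :: rest) = ' ' :: pvSubB max_length rest := by
  rw [pvSubB.eq_def]
  simp

lemma pvSubB_tok (max_length : Int) (c : Char) (rest : List Char) (hc : c ≠ ' ') :
    pvSubB max_length (c :: rest) =
      pvReplB max_length (c :: rest.takeWhile (· ≠ ' ')) ++
        pvSubB max_length (rest.dropWhile (· ≠ ' ')) := by
  rw [pvSubB.eq_def]
  simp [hc]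

lemma pv_go_eq (fuel : Nat) :
    ∀ (l cur : List Char) (accs : List (List Char)), l.length < fuel →
      PySem.Chars.splitOn.go [' '] fuel l cur accs = accs.reverse ++ pvS cur l := by
  induction fuel with
  | zero => intro l cur accs h; omega
  | succ fuel ih =>
      intro l cur accs h
      cases l with
      | nil => simp [PySem.Chars.splitOn.go, pvS]
      | cons c rest =>
          by_cases hc : c = ' '
          · subst hc
            simp only [PySem.Chars.splitOn.go, List.isPrefixOf, List.length_cons] at *
            simp only [BEq.rfl, Bool.true_and, if_pos]
            simp only [List.length_nil, Nat.zero_add, List.drop_succ_cons, List.drop_zero]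
            rw [ih rest [] (cur.reverse :: accs) (by omega)]
            simp [pvS]
          · simp only [PySem.Chars.splitOn.go, List.isPrefixOf]
            rw [if_neg (by simp; exact fun h' => hc h'.symm)]
            rw [ih rest (c :: cur) accs (by simp at h; omega)]
            simp only [pvS]
            rw [if_neg hc]

lemma pv_splitOn_eq (l : List Char) : PySem.Chars.splitOn l [' '] = pvS [] l := by
  unfold PySem.Chars.splitOn
  rw [pv_go_eq (l.length + 1) l [] [] (by omega)]
  rfl

lemma pv_repl_eq (max_length : Int) (w : List Char) (hw : ¬ (' ' ∈ w)) :
    pvWordA max_length w = pvReplB max_length w := by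
  by_cases h : (w.length : Int) > max_length
  · simp [pvWordA, pvReplB, pvHyphenA, h, hw]
  · simp [pvWordA, pvReplB, h]

lemma pvWordA_nil (max_length : Int) : pvWordA max_length [] = [] := by
  unfold pvWordA pvHyphenA
  split_ifs
  · simp [PySem.List.pyRange, PySem.Chars.join, List.intercalate]
  · rfl

-- characterisation of pvS by the leading non-space run
lemma pvS_eq (l cur : List Char) :
    pvS cur l =
      match l.dropWhile (· ≠ ' ') with
      | [] => [cur.reverse ++ l.takeWhile (· ≠ ' ')]
      | _ :: r => (cur.reverse ++ l.takeWhile (· ≠ ' ')) :: pvS [] r := by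
  induction l generalizing cur with
  | nil => simp [pvS]
  | cons c rest ih =>
      by_cases hc : c = ' '
      · subst hc
        simp [pvS, List.dropWhile, List.takeWhile]
      · have hpc : (fun x => decide (x ≠ ' ')) c = true := by simp [hc]
        simp only [pvS, List.dropWhile_cons, List.takeWhile_cons, hpc, if_true, if_neg hc]
        rw [ih (c :: cur)]
        cases hdw : rest.dropWhile (· ≠ ' ') with
        | nil => simp
        | cons d r => simp

lemma pvS_run_nil (l : List Char) (h : l.dropWhile (· ≠ ' ') = []) :
    pvS [] l = [l.takeWhile (· ≠ ' ')] := by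
  rw [pvS_eq, h]
  simp

lemma pvS_run_cons (l r : List Char) (h : l.dropWhile (· ≠ ' ') = ' ' :: r) :
    pvS [] l = l.takeWhile (· ≠ ' ') :: pvS [] r := by
  rw [pvS_eq, h]
  simp

-- the first character dropWhile (· ≠ ' ') stops at is a space
lemma pv_dropWhile_head_space :
    ∀ (l : List Char) (d : Char) (r : List Char),
      l.dropWhile (· ≠ ' ') = d :: r → d = ' ' := by
  intro l
  induction l with
  | nil => intro d r h; simp at h
  | cons c rest ih =>
      intro d r h
      by_cases hc : c = ' '
      · rw [List.dropWhile_cons, if_neg (by simp [hc])] at h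
        cases h; exact hc
      · rw [List.dropWhile_cons, if_pos (by simp [hc])] at h
        exact ih d r h

lemma pv_main (max_length : Int) :
    ∀ (n : Nat) (l : List Char), l.length ≤ n →
      PySem.Chars.join [' '] ((pvS [] l).map (pvWordA max_length)) = pvSubB max_length l := by
  intro n
  induction n with
  | zero =>
      intro l h
      have : l = [] := by cases l <;> simp_all
      subst this
      simp [pvS, pvSubB_nil, pvWordA_nil, PySem.Chars.join_singleton]
  | succ n ih =>
      intro l h
      cases l with
      | nil => simp [pvS, pvSubB_nil, pvWordA_nil, PySem.Chars.join_singleton]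
      | cons c rest =>
          by_cases hc : c = ' '
          · subst hc
            rw [show pvS [] (' ' :: rest) = [] :: pvS [] rest from by simp [pvS]]
            rw [List.map_cons, pvWordA_nil, pvSubB_space]
            obtain ⟨q, t, hxs⟩ := List.exists_cons_of_ne_nil
              (fun hh => pvS_ne_nil [] rest (List.map_eq_nil_iff.mp hh))
            rw [hxs]
            rw [PySem.Chars.join_cons_cons]
            rw [← hxs]
            rw [ih rest (by simp at h; omega)]
            rfl
          · have hpc : (fun x => decide (x ≠ ' ')) c = true := by simp [hc]
            have hdl : (c :: rest).dropWhile (· ≠ ' ') = rest.dropWhile (· ≠ ' ') := by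
              rw [List.dropWhile_cons, if_pos hpc]
            have htl : (c :: rest).takeWhile (· ≠ ' ') = c :: rest.takeWhile (· ≠ ' ') := by
              rw [List.takeWhile_cons, if_pos hpc]
            have htok : ¬ (' ' ∈ c :: rest.takeWhile (· ≠ ' ')) := by
              intro hm
              rcases List.mem_cons.mp hm with h1 | h1
              · exact hc h1.symm
              · have := List.mem_takeWhile_imp h1
                simp at this
            rw [pvSubB_tok max_length c rest hc, ← pv_repl_eq max_length _ htok]
            cases hdw : rest.dropWhile (· ≠ ' ') with
            | nil =>
                rw [pvS_run_nil _ (hdl.trans hdw), htl]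
                rw [List.map_cons, List.map_nil, PySem.Chars.join_singleton,
                  pvSubB_nil, List.append_nil]
            | cons d r =>
                have hd : d = ' ' := pv_dropWhile_head_space rest d r hdw
                subst hd
                rw [pvS_run_cons _ r (hdl.trans hdw), htl, pvSubB_space]
                rw [List.map_cons]
                obtain ⟨q, t, hxs⟩ := List.exists_cons_of_ne_nil
                  (fun hh => pvS_ne_nil [] r (List.map_eq_nil_iff.mp hh))
                rw [hxs, PySem.Chars.join_cons_cons, ← hxs]
                have hr : r.length ≤ n := by
                  have h1 := List.length_dropWhile_le (fun x => decide (x ≠ ' ')) rest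
                  rw [hdw] at h1
                  simp at h1 h
                  omega
                rw [ih r hr, List.append_assoc]
                rfl

lemma pv_foldl_eq_map (max_length : Int) (ws : List (List Char)) :
    ws.foldl
      (fun acc word =>
        if ((word.length : Int) > max_length ∧ ¬ (' ' ∈ word)) then
          acc ++ [pvHyphenA max_length word]
        else
          acc ++ [word]) []
      = ws.map (pvWordA max_length) := by
  have hfun : (fun (acc : List (List Char)) word =>
      if ((word.length : Int) > max_length ∧ ¬ (' ' ∈ word)) then
        acc ++ [pvHyphenA max_length word]
      else
        acc ++ [word]) = fun acc word => acc ++ [pvWordA max_length word] := by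
    funext acc w
    unfold pvWordA
    split_ifs <;> rfl
  rw [hfun, PySem.List.foldl_append_singleton_eq_map]
  rfl

-- ===== VERDICT (by name: the statement is the Claim_ definition above) =====
theorem wrap_long_words_spec : Claim_equal_wrap_long_words := by
  intro text max_length _ _
  show String.ofList (PySem.Chars.join [' ']
      ((PySem.Chars.splitOn text.toList [' ']).foldl
        (fun acc word =>
          if ((word.length : Int) > max_length ∧ ¬ (' ' ∈ word)) then
            acc ++ [pvHyphenA max_length word]
          else
            acc ++ [word]) []))
    = String.ofList (pvSubB max_length text.toList)
  rw [pv_foldl_eq_map, pv_splitOn_eq,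
    pv_main max_length text.toList.length text.toList le_rfl]
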